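-- pv_equiv track=rewrite | github.com/Mlaiel/Spotify-AI-Agent-Backend | backend/app/tenancy/fixtures/templates/examples/config/tenant_templates/configs/environments/dev/manifests/monitoring/alerts/templates/alertmanager/receivers/templates/slack/locales/tools/templates/warning/schemas/scripts/analytics/alerts/algorithms/utils/detectors/pattern_detectors.py | _generate_behavioral_recommendations
-- ===== SOURCE A (Python) =====
-- from typing import Dict, List, Optional, Tuple, Any, Union, Set
--
-- def _generate_behavioral_recommendations(indicators: List[str]) -> List[str]:
--     """Génère des recommandations comportementales"""
--     recommendations = []
--
--     if any("volume" in ind.lower() for ind in indicators):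
--         recommendations.append("Analyser la cause du pic d'activité")
--
--     if any("temporel" in ind.lower() for ind in indicators):
--         recommendations.append("Vérifier les patterns d'utilisation inhabituels")
--
--     if any("localisation" in ind.lower() for ind in indicators):
--         recommendations.append("Confirmer l'authenticité de la nouvelle localisation")
--
--     if any("contenu" in ind.lower() for ind in indicators):
--         recommendations.append("Surveiller les changements de préférences")
--
--     return recommendations or ["Continuer la surveillance comportementale"]
-- ===== SOURCE B (Python) =====
-- def _generate_behavioral_recommendations(indicators):
--     """Single pass: lowercase each indicator once and set four flags; build the list from the flags."""
--     vol = temp = loc = cont = False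
--     for ind in indicators:
--         low = ind.lower()
--         if "volume" in low:
--             vol = True
--         if "temporel" in low:
--             temp = True
--         if "localisation" in low:
--             loc = True
--         if "contenu" in low:
--             cont = True
--     recommendations = []
--     if vol:
--         recommendations.append("Analyser la cause du pic d'activité")
--     if temp:
--         recommendations.append("Vérifier les patterns d'utilisation inhabituels")
--     if loc:
--         recommendations.append("Confirmer l'authenticité de la nouvelle localisation")
--     if cont:
--         recommendations.append("Surveiller les changements de préférences")
--     return recommendations or ["Continuer la surveillance comportementale"]
-- ===== Notes on version B (the rewrite author's own statement) =====
-- stated objective: faster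
-- what changed: Replaces four separate any(...) scans (each lowercasing every indicator again) with one pass that lowercases each indicator once and maintains four boolean flags, then assembles the fixed messages from the flags.
import Mathlib
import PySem

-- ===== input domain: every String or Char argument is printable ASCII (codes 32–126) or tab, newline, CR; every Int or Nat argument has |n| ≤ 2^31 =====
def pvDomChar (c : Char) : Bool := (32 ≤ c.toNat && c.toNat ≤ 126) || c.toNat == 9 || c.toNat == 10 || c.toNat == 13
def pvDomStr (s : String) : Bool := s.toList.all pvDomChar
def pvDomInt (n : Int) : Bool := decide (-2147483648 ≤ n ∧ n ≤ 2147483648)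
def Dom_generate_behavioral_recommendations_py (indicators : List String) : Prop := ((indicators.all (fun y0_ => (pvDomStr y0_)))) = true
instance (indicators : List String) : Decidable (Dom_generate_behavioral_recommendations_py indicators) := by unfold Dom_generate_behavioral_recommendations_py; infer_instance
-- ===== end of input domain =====

-- B replaces A's four any(...) scans with one pass over the indicators maintaining four flags (alternative decomposition, same cost class).

-- ===== PORT A =====
def generate_behavioral_recommendations_py (indicators : List String) : List String :=
  let recommendations : List String := []
  let recommendations :=
    if indicators.any (fun ind => PySem.Str.isIn "volume" (PySem.Str.lower ind)) then
      recommendations ++ ["Analyser la cause du pic d'activité"] else recommendations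
  let recommendations :=
    if indicators.any (fun ind => PySem.Str.isIn "temporel" (PySem.Str.lower ind)) then
      recommendations ++ ["Vérifier les patterns d'utilisation inhabituels"] else recommendations
  let recommendations :=
    if indicators.any (fun ind => PySem.Str.isIn "localisation" (PySem.Str.lower ind)) then
      recommendations ++ ["Confirmer l'authenticité de la nouvelle localisation"] else recommendations
  let recommendations :=
    if indicators.any (fun ind => PySem.Str.isIn "contenu" (PySem.Str.lower ind)) then
      recommendations ++ ["Surveiller les changements de préférences"] else recommendations
  if recommendations = [] then ["Continuer la surveillance comportementale"] else recommendations

-- ===== PORT B =====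
-- one loop-body step of B: lowercase once, update the four flags
def flagStep (st : Bool × Bool × Bool × Bool) (ind : String) : Bool × Bool × Bool × Bool :=
  let low := PySem.Str.lower ind
  let st := if PySem.Str.isIn "volume" low then (true, st.2) else st
  let st := if PySem.Str.isIn "temporel" low then (st.1, true, st.2.2) else st
  let st := if PySem.Str.isIn "localisation" low then (st.1, st.2.1, true, st.2.2.2) else st
  let st := if PySem.Str.isIn "contenu" low then (st.1, st.2.1, st.2.2.1, true) else st
  st

def generate_behavioral_recommendations_py_alt (indicators : List String) : List String :=
  let flags := indicators.foldl flagStep (false, false, false, false)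
  let recommendations : List String := []
  let recommendations := if flags.1 then recommendations ++ ["Analyser la cause du pic d'activité"] else recommendations
  let recommendations := if flags.2.1 then recommendations ++ ["Vérifier les patterns d'utilisation inhabituels"] else recommendations
  let recommendations := if flags.2.2.1 then recommendations ++ ["Confirmer l'authenticité de la nouvelle localisation"] else recommendations
  let recommendations := if flags.2.2.2 then recommendations ++ ["Surveiller les changements de préférences"] else recommendations
  if recommendations = [] then ["Continuer la surveillance comportementale"] else recommendations

-- ===== PRECONDITION & SPEC =====
def Spec_generate_behavioral_recommendations_py (indicators : List String) (out : List String) : Prop := out = generate_behavioral_recommendations_py_alt indicators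
instance (indicators : List String) (out : List String) : Decidable (Spec_generate_behavioral_recommendations_py indicators out) := by unfold Spec_generate_behavioral_recommendations_py; infer_instance

-- ===== CLAIM (what is proved, stated in full; the proofs are below) =====
def Claim_equal_generate_behavioral_recommendations_py : Prop := ∀ (indicators : List String), Dom_generate_behavioral_recommendations_py indicators → Spec_generate_behavioral_recommendations_py indicators (generate_behavioral_recommendations_py indicators)

-- ===== LEMMAS AND PROOFS =====

-- one step of the fold ORs the four membership tests into the flags
theorem flags_step_eq (x : String) (a b c d : Bool) :
    flagStep (a, b, c, d) x
    = (a || PySem.Str.isIn "volume" (PySem.Str.lower x),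
       b || PySem.Str.isIn "temporel" (PySem.Str.lower x),
       c || PySem.Str.isIn "localisation" (PySem.Str.lower x),
       d || PySem.Str.isIn "contenu" (PySem.Str.lower x)) := by
  unfold flagStep
  simp only
  by_cases h1 : PySem.Str.isIn "volume" (PySem.Str.lower x) = true <;>
  by_cases h2 : PySem.Str.isIn "temporel" (PySem.Str.lower x) = true <;>
  by_cases h3 : PySem.Str.isIn "localisation" (PySem.Str.lower x) = true <;>
  by_cases h4 : PySem.Str.isIn "contenu" (PySem.Str.lower x) = true <;>
  [skip; skip; skip; skip; skip; skip; skip; skip; skip; skip; skip; skip; skip; skip; skip; skip] <;>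
  first
  | (simp only [Bool.not_eq_true] at h1 h2 h3 h4 <;> simp only [h1, h2, h3, h4] <;> simp)
  | (simp only [Bool.not_eq_true] at *; simp only [h1, h2, h3, h4] <;> simp)

-- the flag fold computes "the initial flags OR\'d with the four any-scans"
theorem flags_fold_eq (indicators : List String) (a b c d : Bool) :
    indicators.foldl flagStep (a, b, c, d)
    = (a || indicators.any (fun ind => PySem.Str.isIn "volume" (PySem.Str.lower ind)),
       b || indicators.any (fun ind => PySem.Str.isIn "temporel" (PySem.Str.lower ind)),
       c || indicators.any (fun ind => PySem.Str.isIn "localisation" (PySem.Str.lower ind)),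
       d || indicators.any (fun ind => PySem.Str.isIn "contenu" (PySem.Str.lower ind))) := by
  induction indicators generalizing a b c d with
  | nil => simp
  | cons x xs ih =>
    rw [List.foldl_cons, flags_step_eq, ih]
    simp [Bool.or_assoc]

-- ===== VERDICT (by name: the statement is the Claim_ definition above) =====
theorem generate_behavioral_recommendations_py_spec : Claim_equal_generate_behavioral_recommendations_py := by
  intro indicators _
  unfold Spec_generate_behavioral_recommendations_py
  unfold generate_behavioral_recommendations_py generate_behavioral_recommendations_py_alt
  rw [flags_fold_eq]
  simp
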